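-- pv_equiv track=rewrite | github.com/aguomeng1/INF2005_ACW1 | main.py | decode_whitespace
-- ===== SOURCE A (Python) =====
-- def decode_whitespace(stego_text, marker="<<<hidden>>>"):
--     if marker not in stego_text:
--         raise ValueError("Marker not found in the text.")
--
--     parts = stego_text.split(marker)
--     if len(parts) != 2:
--         raise ValueError("Incorrect marker usage or multiple markers found.")
--
--     whitespace_payload = parts[1]
--     binary_payload = ''.join('0' if char == ' ' else '1' for char in whitespace_payload)
--     text = ''.join(chr(int(binary_payload[i:i+8], 2)) for i in range(0, len(binary_payload), 8))
--     return text
-- ===== SOURCE B (Python) =====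
-- def decode_whitespace(stego_text, marker="<<<hidden>>>"):
--     if marker not in stego_text:
--         raise ValueError("Marker not found in the text.")
--
--     parts = stego_text.split(marker)
--     if len(parts) != 2:
--         raise ValueError("Incorrect marker usage or multiple markers found.")
--
--     # Single pass: accumulate bits into an integer, emit a char every 8 bits.
--     out = []
--     value = 0
--     count = 0
--     for ch in parts[1]:
--         value = value * 2 + (0 if ch == ' ' else 1)
--         count += 1
--         if count == 8:
--             out.append(chr(value))
--             value = 0
--             count = 0
--     if count:
--         out.append(chr(value))
--     return ''.join(out)
-- ===== Notes on version B (the rewrite author's own statement) =====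
-- stated objective: alternative
-- what changed: Replaces A's two-stage pipeline (build a full binary digit string, then slice it into 8-character chunks and parse each with int in base 2) with a single pass over the payload that keeps an integer bit accumulator and a bit counter, emitting a character every 8 bits and flushing the partial final byte.
import Mathlib
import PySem

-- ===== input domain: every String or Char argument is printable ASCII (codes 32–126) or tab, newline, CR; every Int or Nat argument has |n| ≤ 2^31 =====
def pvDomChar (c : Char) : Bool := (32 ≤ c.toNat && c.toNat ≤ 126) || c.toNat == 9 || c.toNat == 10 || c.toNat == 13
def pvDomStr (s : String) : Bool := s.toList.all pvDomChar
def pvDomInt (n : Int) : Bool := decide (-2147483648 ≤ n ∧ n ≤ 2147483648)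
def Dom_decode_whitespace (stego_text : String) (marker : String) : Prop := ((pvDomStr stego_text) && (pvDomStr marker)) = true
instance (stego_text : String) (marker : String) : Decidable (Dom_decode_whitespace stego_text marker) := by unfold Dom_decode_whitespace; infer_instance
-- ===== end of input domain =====

-- B replaces A's build-binary-string-then-slice-into-bytes pipeline by a single pass with
-- an integer bit accumulator (objective: alternative, one pass, no intermediate string).

-- ===== PORT A =====
-- A's payload decoding: binary string, then one byte per slice of 8 (literal transliteration)
def pvACore (payload : List Char) : List Char :=
  let binary := payload.map (fun c => if c = ' ' then '0' else '1')
  (PySem.List.pyRange 0 (binary.length : Int) 8).foldl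
    (fun acc i =>
      acc ++ [Char.ofNat (((PySem.Int.ofCharsBase? (PySem.List.slice binary (some i) (some (i + 8))) 2).getD 0).toNat)])
    []

def decode_whitespace (stego_text : String) (marker : String) : String :=
  if PySem.Str.isIn marker stego_text = false then ""   -- Python: raise ValueError (excluded by Pre_)
  else
    match PySem.Str.split? stego_text marker with
    | none => ""                                        -- Python: split raises on empty marker (excluded by Pre_)
    | some parts =>
      if parts.length ≠ 2 then ""                       -- Python: raise ValueError (excluded by Pre_)
      else String.mk (pvACore (parts.getD 1 "").toList)

-- ===== PORT B =====
-- B's single pass: value/count bit accumulator, flush every 8 bits, flush the partial byte at the end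
def pvBLoop (cs : List Char) (value : Int) (count : Int) (out : List Char) : List Char :=
  match cs with
  | [] => if count ≠ 0 then out ++ [Char.ofNat value.toNat] else out
  | c :: rest =>
    let value := value * 2 + (if c = ' ' then 0 else 1)
    let count := count + 1
    if count = 8 then pvBLoop rest 0 0 (out ++ [Char.ofNat value.toNat])
    else pvBLoop rest value count out

def decode_whitespace_alt (stego_text : String) (marker : String) : String :=
  if PySem.Str.isIn marker stego_text = false then ""   -- Python: raise ValueError (excluded by Pre_)
  else
    match PySem.Str.split? stego_text marker with
    | none => ""                                        -- Python: split raises on empty marker (excluded by Pre_)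
    | some parts =>
      if parts.length ≠ 2 then ""                       -- Python: raise ValueError (excluded by Pre_)
      else String.mk (pvBLoop (parts.getD 1 "").toList 0 0 [])

-- ===== PRECONDITION & SPEC =====
-- Pre_ = exactly the inputs on which A returns (marker present, split into exactly two parts);
-- on all other inputs A raises ValueError.
def Pre_decode_whitespace (stego_text : String) (marker : String) : Prop :=
  PySem.Str.isIn marker stego_text = true ∧
  (PySem.Str.split? stego_text marker).map List.length = some 2

instance (stego_text : String) (marker : String) : Decidable (Pre_decode_whitespace stego_text marker) := by
  unfold Pre_decode_whitespace; infer_instance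

def pvWitness_decode_whitespace : String × String := ("head<<m>>A B", "<<m>>")

def Spec_decode_whitespace (stego_text : String) (marker : String) (out : String) : Prop :=
  out = decode_whitespace_alt stego_text marker
instance (stego_text : String) (marker : String) (out : String) : Decidable (Spec_decode_whitespace stego_text marker out) := by
  unfold Spec_decode_whitespace; infer_instance

-- ===== CLAIM (what is proved, stated in full; the proofs are below) =====
def Claim_equal_decode_whitespace : Prop := ∀ (stego_text : String) (marker : String), Dom_decode_whitespace stego_text marker → Pre_decode_whitespace stego_text marker → Spec_decode_whitespace stego_text marker (decode_whitespace stego_text marker)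

-- ===== LEMMAS AND PROOFS =====

-- value of a payload chunk, as both programs compute it (bit 0 for ' ', 1 otherwise)
def pvByteOf (cs : List Char) : Nat :=
  cs.foldl (fun a c => a * 2 + (if c = ' ' then 0 else 1)) 0

-- common chunked description of the decoded bytes
def pvChunkDec (cs : List Char) : List Char :=
  match cs with
  | [] => []
  | c :: rest => Char.ofNat (pvByteOf (c :: rest.take 7)) :: pvChunkDec (rest.drop 7)
termination_by cs.length
decreasing_by simp

-- value of a '0'/'1' list read as binary digits
def pvBitsVal (bs : List Char) : Nat :=
  bs.foldl (fun a c => a * 2 + (if c = '1' then 1 else 0)) 0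

-- all '0'/'1' lists of length exactly n
def pvExBits : Nat → List (List Char)
  | 0 => [[]]
  | n + 1 => (pvExBits n).flatMap (fun l => ['0' :: l, '1' :: l])

lemma pv_mem_exBits (bs : List Char) (hb : ∀ c ∈ bs, c = '0' ∨ c = '1') :
    bs ∈ pvExBits bs.length := by
  induction bs with
  | nil => simp [pvExBits]
  | cons c rest ih =>
    have hrest := ih (fun x hx => hb x (List.mem_cons_of_mem _ hx))
    have hc := hb c (List.mem_cons_self)
    simp only [List.length_cons, pvExBits, List.mem_flatMap]
    exact ⟨rest, hrest, by rcases hc with rfl | rfl <;> simp⟩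

set_option maxRecDepth 40000 in
lemma pv_enum_ok :
    (((List.range 8).flatMap (fun n => pvExBits (n + 1))).all
      (fun bs => PySem.Int.ofCharsBase? bs 2 == some ((pvBitsVal bs : Int)))) = true := by
  decide

lemma pv_chunk_val (bs : List Char) (h1 : bs ≠ []) (h2 : bs.length ≤ 8)
    (hb : ∀ c ∈ bs, c = '0' ∨ c = '1') :
    PySem.Int.ofCharsBase? bs 2 = some ((pvBitsVal bs : Int)) := by
  have hmem : bs ∈ (List.range 8).flatMap (fun n => pvExBits (n + 1)) := by
    have hlen : bs.length ≠ 0 := by simpa using h1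
    refine List.mem_flatMap.2 ⟨bs.length - 1, ?_, ?_⟩
    · simp [List.mem_range]; omega
    · have : bs.length - 1 + 1 = bs.length := by omega
      rw [this]; exact pv_mem_exBits bs hb
  have := List.all_eq_true.1 pv_enum_ok bs hmem
  exact eq_of_beq this

lemma pv_bitsVal_map (cs : List Char) :
    pvBitsVal (cs.map (fun c => if c = ' ' then '0' else '1')) = pvByteOf cs := by
  unfold pvBitsVal pvByteOf
  rw [List.foldl_map]
  congr 1
  funext a c
  by_cases h : c = ' ' <;> simp [h]

-- chunked reading of A's range/slice pipeline, in take/drop form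
lemma pv_chunks (cs : List Char) :
    (List.range ((cs.length + 7) / 8)).map
      (fun k => Char.ofNat (((PySem.Int.ofCharsBase?
          (((cs.map (fun c => if c = ' ' then '0' else '1')).drop (8 * k)).take 8) 2).getD 0).toNat))
      = pvChunkDec cs := by
  induction cs using pvChunkDec.induct with
  | case1 => simp [pvChunkDec]
  | case2 c rest ih =>
    have hK : ((c :: rest).length + 7) / 8 = ((rest.drop 7).length + 7) / 8 + 1 := by
      simp [List.length_drop]; omega
    rw [hK, List.range_succ_eq_map, List.map_cons, List.map_map]
    unfold pvChunkDec
    congr 1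
    · -- head byte
      have hchunk : (((c :: rest).map (fun c => if c = ' ' then '0' else '1')).drop (8 * 0)).take 8
          = ((c :: rest.take 7).map (fun c => if c = ' ' then '0' else '1')) := by
        simp [← List.map_take]
      rw [hchunk]
      rw [pv_chunk_val _ (by simp) (by simp)
        (by intro x hx; rcases List.mem_map.1 hx with ⟨y, _, rfl⟩; by_cases hy : y = ' ' <;> simp [hy])]
      simp only [Option.getD_some, Int.toNat_natCast]
      rw [pv_bitsVal_map]
    · -- tail
      rw [← ih]
      apply List.map_congr_left
      intro k _
      simp only [Function.comp]
      congr 2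
      rw [show 8 * (k + 1) = (7 + 8 * k) + 1 by ring]
      simp only [List.map_cons, List.drop_succ_cons, ← List.map_drop, List.drop_drop]

set_option maxHeartbeats 1000000 in
lemma pv_aCore_eq_chunkDec (cs : List Char) : pvACore cs = pvChunkDec cs := by
  simp only [pvACore]
  rw [PySem.List.pyRange_of_pos _ _ (by norm_num : (0:Int) < 8)]
  rw [PySem.List.foldl_append_singleton_eq_map, List.nil_append, List.map_map]
  have hK : (if (0:Int) < ((cs.map (fun c => if c = ' ' then '0' else '1')).length : Int)
      then ((((cs.map (fun c => if c = ' ' then '0' else '1')).length : Int) - 0 + 8 - 1) / 8).toNat else 0)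
      = (cs.length + 7) / 8 := by
    simp only [List.length_map]
    split_ifs with h
    · have he : ((cs.length : Int) - 0 + 8 - 1) = ((cs.length + 7 : Nat) : Int) := by push_cast; ring
      rw [he, show (8:Int) = ((8:Nat):Int) from rfl, ← Nat.ToInt.div_congr rfl rfl, Int.toNat_natCast]
    · have h0 : cs.length = 0 := by omega
      simp [h0]
  rw [hK, ← pv_chunks]
  apply List.map_congr_left
  intro k _
  simp only [Function.comp]
  have hs : PySem.List.slice (cs.map (fun c => if c = ' ' then '0' else '1'))
      (some (0 + 8 * (k : Int))) (some (0 + 8 * (k : Int) + 8))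
      = ((cs.map (fun c => if c = ' ' then '0' else '1')).drop (8 * k)).take 8 := by
    have ha : (0 + 8 * (k : Int)) = ((8 * k : Nat) : Int) := by push_cast; ring
    rw [ha, show ((8 * k : Nat) : Int) + 8 = ((8 * k + 8 : Nat) : Int) by push_cast; ring,
      PySem.List.slice_natCast]
    congr 1
    omega
  rw [hs]

lemma pv_byteOf_append (pre : List Char) (c : Char) :
    (pvByteOf (pre ++ [c]) : Int) = (pvByteOf pre : Int) * 2 + (if c = ' ' then 0 else 1) := by
  unfold pvByteOf
  rw [List.foldl_append]
  simp only [List.foldl_cons, List.foldl_nil]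
  push_cast
  split_ifs <;> simp

lemma pv_bLoop_inv (cs : List Char) : ∀ (pre acc : List Char), pre.length < 8 →
    pvBLoop cs ((pvByteOf pre : Int)) ((pre.length : Int)) acc = acc ++ pvChunkDec (pre ++ cs) := by
  induction cs with
  | nil =>
    intro pre acc hpre
    unfold pvBLoop
    cases pre with
    | nil => simp [pvChunkDec]
    | cons p pre' =>
      rw [if_pos (by simp; omega)]
      unfold pvChunkDec
      have h7 : pre'.length ≤ 7 := by simp at hpre; omega
      simp [List.take_of_length_le h7, List.drop_of_length_le h7, pvChunkDec]
  | cons c rest ih =>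
    intro pre acc hpre
    show (if ((pre.length : Int) + 1 = 8) then _ else _) = _
    rw [show ((pvByteOf pre : Int) * 2 + (if c = ' ' then 0 else 1)) = (pvByteOf (pre ++ [c]) : Int) from (pv_byteOf_append pre c).symm]
    by_cases h8 : pre.length = 7
    · rw [if_pos (by rw [h8]; norm_num)]
      have h0 := ih [] (acc ++ [Char.ofNat ((pvByteOf (pre ++ [c]) : Int)).toNat]) (by simp)
      simp only [show pvByteOf [] = 0 from rfl, List.length_nil, Nat.cast_zero, List.nil_append] at h0
      rw [h0]
      cases pre with
      | nil => simp at h8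
      | cons p pre' =>
        have h6 : pre'.length = 6 := by simpa using h8
        have htake : (pre' ++ c :: rest).take 7 = pre' ++ [c] := by
          rw [show 7 = pre'.length + 1 by omega, List.take_append]
          simp
        have hdrop : (pre' ++ c :: rest).drop 7 = rest := by
          rw [show 7 = pre'.length + 1 by omega, List.drop_append]
          simp
        rw [show (p :: pre') ++ c :: rest = p :: (pre' ++ c :: rest) from rfl]
        rw [show pvChunkDec (p :: (pre' ++ c :: rest))
              = Char.ofNat (pvByteOf (p :: (pre' ++ c :: rest).take 7)) :: pvChunkDec ((pre' ++ c :: rest).drop 7)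
            from by rw [pvChunkDec]]
        rw [htake, hdrop]
        simp [Int.toNat_natCast, List.append_assoc]
    · rw [if_neg (by intro hcon; apply h8; omega)]
      have : ((pre.length : Int) + 1) = (((pre ++ [c]).length : Nat) : Int) := by
        simp
      rw [this, ih (pre ++ [c]) acc (by simp; omega)]
      simp [List.append_assoc]

-- ===== VERDICT (by name: the statement is the Claim_ definition above) =====
theorem decode_whitespace_spec : Claim_equal_decode_whitespace := by
  intro stego marker _hdom hpre
  obtain ⟨h1, h2⟩ := hpre
  unfold Spec_decode_whitespace decode_whitespace decode_whitespace_alt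
  rcases hsp : PySem.Str.split? stego marker with _ | parts
  · simp [hsp] at h2
  · rw [hsp] at h2
    simp only [Option.map_some, Option.some.injEq] at h2
    have hkey : pvBLoop (parts.getD 1 "").toList 0 0 [] = pvACore (parts.getD 1 "").toList := by
      have hb := pv_bLoop_inv (parts.getD 1 "").toList [] [] (by simp)
      simp only [show pvByteOf [] = 0 from rfl, List.length_nil, Nat.cast_zero, List.nil_append] at hb
      rw [hb, pv_aCore_eq_chunkDec]
    rw [List.getD_eq_getElem parts "" (by omega : 1 < parts.length)] at hkey
    simp [h2, hkey]
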